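-- pv_equiv track=rewrite | github.com/StarsExpress/LeetCode-Repository | hash/string_remains.py | seek_string_remains
-- ===== SOURCE A (Python) =====
-- def seek_string_remains(string: str):  # LeetCode Q.3039.
--     if len(string) <= 1:
--         return string
--
--     # Track each char's count and its last occurred idx.
--     chars, counts_table, last_indices_table = list(string), dict(), dict()
--     max_count = 0
--     for idx, char in enumerate(chars):
--         if char not in counts_table.keys():
--             counts_table.update({char: 0})
--
--         counts_table[char] += 1
--         if counts_table[char] > max_count:
--             max_count = counts_table[char]
--
--         last_indices_table.update({char: idx})
--
--     remaining_chars_indices = []  # Last remaining chars must have the highest count.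
--     for char, count in counts_table.items():
--         if count == max_count:  # Find remaining char's last occurred idx.
--             remaining_chars_indices.append(last_indices_table[char])
--
--     remaining_chars_indices.sort()  # Sort by last occurred idx and concat string.
--     return "".join(chars[idx] for idx in remaining_chars_indices)
-- ===== SOURCE B (Python) =====
-- def seek_string_remains(string: str):  # LeetCode Q.3039.
--     if len(string) <= 1:
--         return string
--
--     # One counting pass, then a reverse scan that emits each max-count
--     # char at its last occurrence; reversing restores ascending order.
--     counts = {}
--     for ch in string:
--         counts[ch] = counts.get(ch, 0) + 1
--     max_count = max(counts.values())
--
--     seen = set()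
--     kept_reversed = []
--     for ch in reversed(string):
--         if counts[ch] == max_count and ch not in seen:
--             seen.add(ch)
--             kept_reversed.append(ch)
--     return "".join(reversed(kept_reversed))
-- ===== Notes on version B (the rewrite author's own statement) =====
-- stated objective: faster
-- what changed: Replaces the last-index table, the dict-items scan and the explicit sort of indices by one counting pass plus a single reverse scan with a seen-set that emits each max-count char at its last occurrence, then reverses.
import Mathlib
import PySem

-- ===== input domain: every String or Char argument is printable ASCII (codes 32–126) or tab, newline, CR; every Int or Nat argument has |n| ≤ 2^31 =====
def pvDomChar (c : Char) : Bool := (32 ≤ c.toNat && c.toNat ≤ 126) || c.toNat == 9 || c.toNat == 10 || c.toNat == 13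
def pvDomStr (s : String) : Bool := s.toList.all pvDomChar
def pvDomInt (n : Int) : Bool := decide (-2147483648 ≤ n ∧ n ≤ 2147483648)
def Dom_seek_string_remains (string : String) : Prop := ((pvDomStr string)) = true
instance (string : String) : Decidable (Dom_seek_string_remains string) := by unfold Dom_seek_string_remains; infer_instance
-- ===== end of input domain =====

-- B replaces A's last-index table, items scan and index sort by one reverse scan with a
-- seen-set (each max-count char emitted at its last occurrence), then a final reverse.

-- ===== PORT A =====
def seek_string_remains (string : String) : String :=
  if PySem.Str.len string ≤ 1 then string
  else
    let chars := string.toList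
    let st :=
      (PySem.List.enumerate chars 0).foldl
        (fun (st : PySem.Dict Char Int × PySem.Dict Char Int × Int) p =>
          let counts := if st.1.contains p.2 then st.1 else st.1.insert p.2 0
          let counts := counts.insert p.2 (counts.getD p.2 0 + 1)
          let maxc := if counts.getD p.2 0 > st.2.2 then counts.getD p.2 0 else st.2.2
          (counts, st.2.1.insert p.2 p.1, maxc))
        (PySem.Dict.empty, PySem.Dict.empty, 0)
    let idxs := st.1.items.foldl
        (fun acc p => if p.2 == st.2.2 then acc ++ [(st.2.1).getD p.1 0] else acc) []
    let idxs := PySem.List.sorted idxs (fun i => i) false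
    -- the collected indices are last-occurrence positions, always in range, so pyGetD is exact
    String.ofList (idxs.foldl (fun acc i => acc ++ [PySem.List.pyGetD chars i ' ']) [])

-- ===== PORT B =====
def seek_string_remains_alt (string : String) : String :=
  if PySem.Str.len string ≤ 1 then string
  else
    let cs := string.toList
    let counts := cs.foldl (fun (d : PySem.Dict Char Int) c => d.insert c (d.getD c 0 + 1)) PySem.Dict.empty
    -- max(counts.values()): counts is nonempty here (len ≥ 2), so the getD default is never used
    let maxCount := (PySem.List.max? (PySem.Dict.values counts) (fun v => v)).getD 0
    let st := cs.reverse.foldl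
        (fun (st : PySem.Set Char × List Char) c =>
          if counts.getD c 0 == maxCount && !(PySem.Set.contains st.1 c)
          then (PySem.Set.add st.1 c, st.2 ++ [c]) else st)
        (PySem.Set.empty, [])
    String.ofList st.2.reverse

-- ===== PRECONDITION & SPEC =====
def Spec_seek_string_remains (string : String) (out : String) : Prop := out = seek_string_remains_alt string
instance (string : String) (out : String) : Decidable (Spec_seek_string_remains string out) := by unfold Spec_seek_string_remains; infer_instance

-- ===== CLAIM (what is proved, stated in full; the proofs are below) =====
def Claim_equal_seek_string_remains : Prop := ∀ (string : String), Dom_seek_string_remains string → Spec_seek_string_remains string (seek_string_remains string)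

-- ===== LEMMAS AND PROOFS =====

-- kept pairs: (index, char) of every char c with q c = true, at its LAST occurrence, ascending
def canonIdx (q : Char → Bool) (s : Int) : List Char → List (Int × Char)
  | [] => []
  | c :: t => if q c ∧ c ∉ t then (s, c) :: canonIdx q (s + 1) t else canonIdx q (s + 1) t

-- the same chars, threading an initial seen-set (B's reverse scan lands here)
def canonS (q : Char → Bool) (seen : PySem.Set Char) : List Char → List Char
  | [] => []
  | c :: t => if q c ∧ c ∉ t ∧ c ∉ seen then c :: canonS q seen t else canonS q seen t

-- what B's reverse loop emits
def emitRev (q : Char → Bool) : List Char → PySem.Set Char → List Char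
  | [], _ => []
  | c :: t, s => if q c && !(PySem.Set.contains s c)
                 then c :: emitRev q t (PySem.Set.add s c) else emitRev q t s

-- A's last-occurrence dict
def lastFold (t : List Char) : PySem.Dict Char Int :=
  (PySem.List.enumerate t 0).foldl (fun d p => d.insert p.2 p.1) PySem.Dict.empty

-- m is the maximal multiplicity in cs
def GoodMax (cs : List Char) (m : Int) : Prop :=
  (∀ c, (cs.count c : Int) ≤ m) ∧ (m = 0 ∨ ∃ c ∈ cs, (cs.count c : Int) = m)

theorem goodMax_unique {cs : List Char} {m m' : Int} (h : cs ≠ [])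
    (h1 : GoodMax cs m) (h2 : GoodMax cs m') : m = m' := by
  obtain ⟨c, t, rfl⟩ := List.exists_cons_of_ne_nil h
  obtain ⟨ub1, at1⟩ := h1
  obtain ⟨ub2, at2⟩ := h2
  have hc : (1 : Int) ≤ ((c :: t).count c : Int) := by
    have : (c :: t).count c = t.count c + 1 := List.count_cons_self
    omega
  rcases at1 with rfl | ⟨d, _, hd⟩
  · exact absurd (ub1 c) (by omega)
  rcases at2 with rfl | ⟨e, _, he⟩
  · exact absurd (ub2 c) (by omega)
  have := ub1 e
  have := ub2 d
  omega

theorem exists_last_decomp {t : List Char} {c : Char} (h : c ∈ t) :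
    ∃ u v, t = u ++ c :: v ∧ c ∉ v := by
  induction t using List.reverseRecOn with
  | nil => simp at h
  | append_singleton t a ih =>
    by_cases hca : c = a
    · exact ⟨t, [], by simp [hca], by simp⟩
    · have : c ∈ t := by
        rcases List.mem_append.1 h with h' | h'
        · exact h'
        · simp at h'; exact absurd h' hca
      obtain ⟨u, v, rfl, hv⟩ := ih this
      exact ⟨u, v ++ [a], by simp, by simp [hv, hca]⟩

theorem mem_canonIdx {q : Char → Bool} {c : Char} :
    ∀ {t : List Char} {s i : Int},
      (i, c) ∈ canonIdx q s t ↔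
        q c = true ∧ ∃ u v, t = u ++ c :: v ∧ c ∉ v ∧ i = s + u.length := by
  intro t
  induction t with
  | nil => intro s i; simp [canonIdx]
  | cons a t ih =>
    intro s i
    simp only [canonIdx]
    split_ifs with h
    · constructor
      · intro hm
        rcases List.mem_cons.1 hm with he | hm'
        · obtain ⟨rfl, rfl⟩ : i = s ∧ c = a := by simpa [Prod.ext_iff] using he
          exact ⟨h.1, [], t, by simp, h.2, by simp⟩
        · obtain ⟨hq, u, v, rfl, hv, rfl⟩ := ih.1 hm'
          exact ⟨hq, a :: u, v, by simp, hv, by simp only [List.length_cons]; push_cast; omega⟩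
      · rintro ⟨hq, u, v, ht, hv, rfl⟩
        cases u with
        | nil =>
          obtain ⟨rfl, rfl⟩ : a = c ∧ t = v := by simpa using ht
          simp
        | cons a' u' =>
          obtain ⟨rfl, rfl⟩ : a = a' ∧ t = u' ++ c :: v := by simpa using ht
          refine List.mem_cons_of_mem _ (ih.2 ⟨hq, u', v, rfl, hv, ?_⟩)
          simp only [List.length_cons]; push_cast; omega
    · constructor
      · intro hm
        obtain ⟨hq, u, v, rfl, hv, rfl⟩ := ih.1 hm
        exact ⟨hq, a :: u, v, by simp, hv, by simp only [List.length_cons]; push_cast; omega⟩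
      · rintro ⟨hq, u, v, ht, hv, rfl⟩
        cases u with
        | nil =>
          obtain ⟨rfl, rfl⟩ : a = c ∧ t = v := by simpa using ht
          exact absurd ⟨hq, hv⟩ h
        | cons a' u' =>
          obtain ⟨rfl, rfl⟩ : a = a' ∧ t = u' ++ c :: v := by simpa using ht
          refine ih.2 ⟨hq, u', v, rfl, hv, ?_⟩
          simp only [List.length_cons]; push_cast; omega

theorem canonIdx_fst_lb {q : Char → Bool} :
    ∀ {t : List Char} {s : Int} {p : Int × Char}, p ∈ canonIdx q s t → s ≤ p.1 := by
  intro t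
  induction t with
  | nil => intro s p hp; simp [canonIdx] at hp
  | cons a t ih =>
    intro s p hp
    simp only [canonIdx] at hp
    split_ifs at hp with h
    · rcases List.mem_cons.1 hp with rfl | hp'
      · simp
      · have := ih hp'; omega
    · have := ih hp; omega

theorem canonIdx_fst_pairwise {q : Char → Bool} :
    ∀ {t : List Char} {s : Int}, (canonIdx q s t).Pairwise (fun p p' => p.1 < p'.1) := by
  intro t
  induction t with
  | nil => intro s; simp [canonIdx]
  | cons a t ih =>
    intro s
    simp only [canonIdx]
    split_ifs with h
    · refine List.Pairwise.cons (fun p hp => ?_) ih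
      have := canonIdx_fst_lb hp; simp; omega
    · exact ih

theorem canonIdx_snd_mem {q : Char → Bool} {t : List Char} {s : Int} {c : Char} :
    c ∈ (canonIdx q s t).map (·.2) ↔ q c = true ∧ c ∈ t := by
  constructor
  · intro hm
    obtain ⟨⟨i, c'⟩, hp, rfl⟩ := List.mem_map.1 hm
    obtain ⟨hq, u, v, rfl, _, _⟩ := mem_canonIdx.1 hp
    exact ⟨hq, by simp⟩
  · rintro ⟨hq, hc⟩
    obtain ⟨u, v, rfl, hv⟩ := exists_last_decomp hc
    exact List.mem_map.2 ⟨(s + u.length, c),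
      mem_canonIdx.2 ⟨hq, u, v, rfl, hv, rfl⟩, rfl⟩

theorem canonIdx_snd_nodup {q : Char → Bool} :
    ∀ {t : List Char} {s : Int}, ((canonIdx q s t).map (·.2)).Nodup := by
  intro t
  induction t with
  | nil => intro s; simp [canonIdx]
  | cons a t ih =>
    intro s
    simp only [canonIdx]
    split_ifs with h
    · simp only [List.map_cons]
      refine List.Nodup.cons (fun ha => ?_) ih
      exact h.2 (canonIdx_snd_mem.1 ha).2
    · exact ih

theorem getD_lfold_not_mem {c : Char} :
    ∀ {t : List Char} {s : Int} {d : PySem.Dict Char Int}, c ∉ t →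
      ((PySem.List.enumerate t s).foldl (fun d p => d.insert p.2 p.1) d).getD c 0 = d.getD c 0 := by
  intro t
  induction t with
  | nil => intro s d _; simp [PySem.List.enumerate_nil]
  | cons a t ih =>
    intro s d hc
    rw [PySem.List.enumerate_cons, List.foldl_cons]
    simp only [not_or, List.mem_cons] at hc
    rw [ih hc.2, PySem.Dict.getD_insert]
    simp [hc.1]

theorem getD_lfold_decomp {c : Char} :
    ∀ {u v : List Char} {s : Int} {d : PySem.Dict Char Int}, c ∉ v →
      ((PySem.List.enumerate (u ++ c :: v) s).foldl (fun d p => d.insert p.2 p.1) d).getD c 0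
        = s + u.length := by
  intro u
  induction u with
  | nil =>
    intro v s d hv
    rw [List.nil_append, PySem.List.enumerate_cons, List.foldl_cons, getD_lfold_not_mem hv]
    simp [PySem.Dict.getD_insert_self]
  | cons a u' ih =>
    intro v s d hv
    rw [List.cons_append, PySem.List.enumerate_cons, List.foldl_cons, ih hv]
    simp only [List.length_cons]; push_cast; omega

theorem getD_lastFold_decomp {u v : List Char} {c : Char} (hv : c ∉ v) :
    (lastFold (u ++ c :: v)).getD c 0 = u.length := by
  have := getD_lfold_decomp (u := u) (v := v) (s := 0) (d := PySem.Dict.empty) hv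
  simpa [lastFold] using this

-- A's loop body, after collapsing the two-phase count update and the running-max `if`
def stepA (st : PySem.Dict Char Int × PySem.Dict Char Int × Int) (p : Int × Char) :
    PySem.Dict Char Int × PySem.Dict Char Int × Int :=
  (st.1.insert p.2 (st.1.getD p.2 0 + 1), st.2.1.insert p.2 p.1,
    max st.2.2 (st.1.getD p.2 0 + 1))

def AFold (t : List Char) : PySem.Dict Char Int × PySem.Dict Char Int × Int :=
  (PySem.List.enumerate t 0).foldl stepA (PySem.Dict.empty, PySem.Dict.empty, 0)

-- B's counting dict
def cFold (t : List Char) : PySem.Dict Char Int :=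
  t.foldl (fun d c => d.insert c (d.getD c 0 + 1)) PySem.Dict.empty

theorem getD_cFold (t : List Char) (c : Char) : (cFold t).getD c 0 = (t.count c : Int) := by
  simp [cFold, PySem.Dict.getD_foldl_insert_add_one]

theorem A_step_eq (st : PySem.Dict Char Int × PySem.Dict Char Int × Int) (p : Int × Char) :
    (let counts := if st.1.contains p.2 then st.1 else st.1.insert p.2 0
     let counts := counts.insert p.2 (counts.getD p.2 0 + 1)
     let maxc := if counts.getD p.2 0 > st.2.2 then counts.getD p.2 0 else st.2.2
     (counts, st.2.1.insert p.2 p.1, maxc)) = stepA st p := by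
  by_cases h : st.1.contains p.2
  · simp only [stepA, h, if_true, PySem.Dict.getD_insert_self, Prod.mk.injEq]
    exact ⟨trivial, trivial, by split_ifs <;> omega⟩
  · have h' : st.1.contains p.2 = false := by simpa using h
    have h0 : st.1.getD p.2 0 = 0 := PySem.Dict.getD_of_not_contains st.1 0 h'
    simp only [stepA, h', Bool.false_eq_true, if_false, PySem.Dict.getD_insert_self,
      PySem.Dict.insert_insert_self, h0, Prod.mk.injEq]
    exact ⟨trivial, trivial, by split_ifs <;> omega⟩

theorem AFold_append (t : List Char) (a : Char) :
    AFold (t ++ [a]) = stepA (AFold t) ((t.length : Int), a) := by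
  rw [AFold, PySem.List.enumerate_append, List.foldl_append]
  simp [PySem.List.enumerate_cons, PySem.List.enumerate_nil, AFold]

theorem lastFold_append (t : List Char) (a : Char) :
    lastFold (t ++ [a]) = (lastFold t).insert a (t.length : Int) := by
  rw [lastFold, PySem.List.enumerate_append, List.foldl_append]
  simp [PySem.List.enumerate_cons, PySem.List.enumerate_nil, lastFold]

theorem cFold_append (t : List Char) (a : Char) :
    cFold (t ++ [a]) = (cFold t).insert a ((cFold t).getD a 0 + 1) := by
  rw [cFold, List.foldl_append, cFold]
  simp only [List.foldl_cons, List.foldl_nil]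

theorem count_append_singleton (t : List Char) (a c : Char) :
    ((t ++ [a]).count c : Int) = (t.count c : Int) + (if c = a then 1 else 0) := by
  by_cases hca : c = a
  · subst hca; simp [List.count_append]
  · simp [List.count_append, Ne.symm hca, hca]

theorem AFold_spec (t : List Char) :
    (AFold t).1 = cFold t ∧ (AFold t).2.1 = lastFold t ∧ GoodMax t (AFold t).2.2 := by
  induction t using List.reverseRecOn with
  | nil =>
    exact ⟨rfl, rfl, fun c => by simp [AFold, PySem.List.enumerate_nil], Or.inl rfl⟩
  | append_singleton t a ih =>
    obtain ⟨h1, h2, hub, hat⟩ := ih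
    rw [AFold_append]
    refine ⟨?_, ?_, ?_, ?_⟩
    · rw [stepA, cFold_append, h1]
    · rw [stepA, lastFold_append, h2]
    · intro c
      simp only [stepA, h1, getD_cFold]
      have hcnt := count_append_singleton t a c
      have h3 := hub c
      rw [le_max_iff]
      by_cases hca : c = a
      · subst hca; rw [if_pos rfl] at hcnt; omega
      · rw [if_neg hca] at hcnt; omega
    · simp only [stepA, h1, getD_cFold]
      have hcnta := count_append_singleton t a a
      rw [if_pos rfl] at hcnta
      rcases le_total (AFold t).2.2 ((t.count a : Int) + 1) with hle | hle
      · rw [max_eq_right hle]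
        refine Or.inr ⟨a, by simp, by omega⟩
      · rw [max_eq_left hle]
        rcases hat with h0 | ⟨d, hd, hcd⟩
        · have := hub a; left; omega
        · have hda : d ≠ a := by
            rintro rfl
            omega
          have hcntd := count_append_singleton t a d
          rw [if_neg hda] at hcntd
          exact Or.inr ⟨d, List.mem_append_left _ hd, by omega⟩

theorem Bmax_good {cs : List Char} (h : cs ≠ []) :
    GoodMax cs ((PySem.List.max? (PySem.Dict.values (cFold cs)) (fun v => v)).getD 0) := by
  have hv : PySem.Dict.values (cFold cs)
      = (PySem.Set.ofList cs).map (fun k => (cs.count k : Int)) := by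
    rw [cFold, PySem.Dict.foldl_insert_getD_add_one_eq_counter]
    simp [PySem.Dict.values, PySem.Dict.items_counter]
  have hne : PySem.Dict.values (cFold cs) ≠ [] := by
    obtain ⟨c, t, rfl⟩ := List.exists_cons_of_ne_nil h
    rw [hv]
    simp only [ne_eq, List.map_eq_nil_iff]
    intro hnil
    have : c ∈ PySem.Set.ofList (c :: t) := (PySem.Set.mem_ofList _ _).2 (by simp)
    rw [hnil] at this; simp at this
  obtain ⟨m, hm⟩ : ∃ m, PySem.List.max? (PySem.Dict.values (cFold cs)) (fun v => v) = some m := by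
    rcases hopt : PySem.List.max? (PySem.Dict.values (cFold cs)) (fun v => v) with _ | m
    · exact absurd ((PySem.List.max?_eq_none_iff _ _).1 hopt) hne
    · exact ⟨m, rfl⟩
  rw [hm]
  simp only [Option.getD_some]
  have hmem := PySem.List.max?_mem hm
  have hmax := PySem.List.max?_isMax hm
  rw [hv] at hmem hmax
  obtain ⟨d, hdmem, hd⟩ := List.mem_map.1 hmem
  constructor
  · intro x
    by_cases hx : x ∈ cs
    · exact hmax _ (List.mem_map.2 ⟨x, (PySem.Set.mem_ofList _ _).2 hx, rfl⟩)
    · have hx0 : cs.count x = 0 := List.count_eq_zero.2 hx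
      have : (0 : Int) ≤ (cs.count d : Int) := Int.natCast_nonneg _
      rw [hx0]
      omega
  · exact Or.inr ⟨d, (PySem.Set.mem_ofList _ _).1 hdmem, hd⟩

theorem cond_iff (q : Char → Bool) (s : PySem.Set Char) (c : Char) :
    (q c && !(PySem.Set.contains s c)) = true ↔ (q c = true ∧ c ∉ s) := by
  simp

theorem B_loop (q : Char → Bool) :
    ∀ (r : List Char) (s : PySem.Set Char) (o : List Char),
      (r.foldl (fun st c => if q c && !(PySem.Set.contains st.1 c)
          then (PySem.Set.add st.1 c, st.2 ++ [c]) else st)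
        ((s, o) : PySem.Set Char × List Char)).2 = o ++ emitRev q r s := by
  intro r
  induction r with
  | nil => intro s o; simp [emitRev]
  | cons c r ih =>
    intro s o
    simp only [List.foldl_cons, emitRev]
    by_cases h : (q c && !(PySem.Set.contains s c)) = true
    · rw [if_pos h, if_pos h, ih]; simp
    · rw [if_neg h, if_neg h, ih]

theorem emitRev_append (q : Char → Bool) :
    ∀ (a : List Char) (c : Char) (s : PySem.Set Char),
      emitRev q (a ++ [c]) s
        = emitRev q a s ++ (if q c = true ∧ c ∉ s ∧ c ∉ a then [c] else []) := by
  intro a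
  induction a with
  | nil =>
    intro c s
    simp only [List.nil_append, emitRev]
    by_cases hq : q c = true ∧ c ∉ s
    · rw [if_pos ((cond_iff q s c).2 hq), if_pos ⟨hq.1, hq.2, by simp⟩]
    · rw [if_neg (fun hh => hq ((cond_iff q s c).1 hh)),
        if_neg (fun hh => hq ⟨hh.1, hh.2.1⟩)]
  | cons b a ih =>
    intro c s
    simp only [List.cons_append, emitRev]
    by_cases h : (q b && !(PySem.Set.contains s b)) = true
    · rw [if_pos h, if_pos h, ih]
      have hiff : (q c = true ∧ c ∉ PySem.Set.add s b ∧ c ∉ a)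
          ↔ (q c = true ∧ c ∉ s ∧ c ∉ b :: a) := by
        simp only [PySem.Set.mem_add, List.mem_cons, not_or]
        tauto
      rw [if_congr hiff rfl rfl]
      simp
    · rw [if_neg h, if_neg h, ih]
      have h' : ¬(q b = true ∧ b ∉ s) := fun hh => h ((cond_iff q s b).2 hh)
      have hiff : (q c = true ∧ c ∉ s ∧ c ∉ a)
          ↔ (q c = true ∧ c ∉ s ∧ c ∉ b :: a) := by
        constructor
        · rintro ⟨hq, hs, ha⟩
          refine ⟨hq, hs, ?_⟩
          simp only [List.mem_cons, not_or]
          exact ⟨fun hcb => h' ⟨hcb ▸ hq, hcb ▸ hs⟩, ha⟩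
        · rintro ⟨hq, hs, ha⟩
          exact ⟨hq, hs, fun hca => ha (List.mem_cons_of_mem _ hca)⟩
      rw [if_congr hiff rfl rfl]

theorem emitRev_reverse (q : Char → Bool) :
    ∀ (t : List Char) (s : PySem.Set Char),
      (emitRev q t.reverse s).reverse = canonS q s t := by
  intro t
  induction t with
  | nil => intro s; simp [emitRev, canonS]
  | cons c t ih =>
    intro s
    rw [List.reverse_cons, emitRev_append, List.reverse_append, ih]
    simp only [canonS]
    by_cases hC : q c = true ∧ c ∉ t ∧ c ∉ s
    · rw [if_pos ⟨hC.1, hC.2.2, by simpa using hC.2.1⟩, if_pos hC]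
      simp
    · rw [if_neg (fun hh => hC ⟨hh.1, by simpa using hh.2.2, hh.2.1⟩), if_neg hC]
      simp

theorem canonS_empty (q : Char → Bool) :
    ∀ (t : List Char) (s : Int),
      canonS q PySem.Set.empty t = (canonIdx q s t).map (·.2) := by
  intro t
  induction t with
  | nil => intro s; simp [canonS, canonIdx]
  | cons c t ih =>
    intro s
    simp only [canonS, canonIdx]
    by_cases h : q c = true ∧ c ∉ t
    · rw [if_pos ⟨h.1, h.2, by simp [PySem.Set.empty]⟩, if_pos h, List.map_cons, ih (s + 1)]
    · rw [if_neg (fun hh => h ⟨hh.1, hh.2.1⟩), if_neg h]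
      exact ih (s + 1)

-- A's fold, literally as written in the port
def AFoldA (t : List Char) : PySem.Dict Char Int × PySem.Dict Char Int × Int :=
  (PySem.List.enumerate t 0).foldl
    (fun (st : PySem.Dict Char Int × PySem.Dict Char Int × Int) p =>
      let counts := if st.1.contains p.2 then st.1 else st.1.insert p.2 0
      let counts := counts.insert p.2 (counts.getD p.2 0 + 1)
      let maxc := if counts.getD p.2 0 > st.2.2 then counts.getD p.2 0 else st.2.2
      (counts, st.2.1.insert p.2 p.1, maxc))
    (PySem.Dict.empty, PySem.Dict.empty, 0)

theorem AFoldA_eq (t : List Char) : AFoldA t = AFold t := by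
  unfold AFoldA AFold
  exact PySem.List.foldl_congr_mem (l := PySem.List.enumerate t 0)
    (init := (PySem.Dict.empty, PySem.Dict.empty, 0)) (h := fun acc x _ => A_step_eq acc x)

theorem main_eq (cs : List Char) (hne : cs ≠ []) :
    String.ofList
      ((PySem.List.sorted
          ((AFoldA cs).1.items.foldl
            (fun acc p => if p.2 == (AFoldA cs).2.2
              then acc ++ [(AFoldA cs).2.1.getD p.1 0] else acc) [])
          (fun i => i) false).foldl
        (fun acc i => acc ++ [PySem.List.pyGetD cs i ' ']) [])
    = String.ofList
        ((cs.reverse.foldl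
            (fun (st : PySem.Set Char × List Char) c =>
              if (cFold cs).getD c 0
                    == (PySem.List.max? (PySem.Dict.values (cFold cs)) (fun v => v)).getD 0
                  && !(PySem.Set.contains st.1 c)
              then (PySem.Set.add st.1 c, st.2 ++ [c]) else st)
            (PySem.Set.empty, [])).2.reverse) := by
  obtain ⟨h1, h2, h3⟩ := AFold_spec cs
  have hMB : (PySem.List.max? (PySem.Dict.values (cFold cs)) (fun v => v)).getD 0
      = (AFold cs).2.2 := goodMax_unique hne (Bmax_good hne) h3
  rw [AFoldA_eq, h1, h2, hMB]
  set M := (AFold cs).2.2 with hM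
  -- B side
  have hB := B_loop (fun c => (cs.count c : Int) == M) cs.reverse PySem.Set.empty []
  simp only [getD_cFold]
  beta_reduce at hB
  rw [hB, List.nil_append, emitRev_reverse, canonS_empty _ cs 0]
  -- A side
  have hitems : (cFold cs).items
      = (PySem.Set.ofList cs).map (fun k => (k, (cs.count k : Int))) := by
    rw [cFold, PySem.Dict.foldl_insert_getD_add_one_eq_counter, PySem.Dict.items_counter]
  rw [hitems,
    PySem.List.foldl_append_if (fun x : Char × Int => x.2 == M)
      (fun x : Char × Int => (lastFold cs).getD x.1 0),
    List.filter_map, List.map_map, List.nil_append]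
  simp only [Function.comp_def]
  set q : Char → Bool := fun c => ((cs.count c : Int) == M) with hqdef
  set killers := (PySem.Set.ofList cs).filter q with hk
  set fL : Char → Int := fun c => (lastFold cs).getD c 0 with hfL
  -- every kept pair carries its char's last index and the char at that index
  have hpair : ∀ p ∈ canonIdx q 0 cs, fL p.2 = p.1 ∧ PySem.List.pyGetD cs p.1 ' ' = p.2 := by
    rintro ⟨i, c⟩ hp
    obtain ⟨hqc, u, v, hdec, hv, hi⟩ := mem_canonIdx.1 hp
    subst hdec
    have hi' : i = (u.length : Int) := by omega
    subst hi'
    refine ⟨getD_lastFold_decomp hv, ?_⟩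
    rw [PySem.List.pyGetD_natCast]
    simp
  have e1 : (canonIdx q 0 cs).map (·.1) = ((canonIdx q 0 cs).map (·.2)).map fL := by
    rw [List.map_map]
    exact (List.map_eq_map_iff.mpr (fun p hp => ((hpair p hp).1).symm)).symm ▸ rfl
  have e2 : ((canonIdx q 0 cs).map (·.2)).Perm killers := by
    refine (List.perm_ext_iff_of_nodup canonIdx_snd_nodup
      (List.Nodup.filter _ (PySem.Set.nodup_ofList cs))).mpr (fun x => ?_)
    rw [canonIdx_snd_mem, List.mem_filter]
    constructor
    · rintro ⟨hqx, hx⟩; exact ⟨(PySem.Set.mem_ofList _ _).2 hx, hqx⟩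
    · rintro ⟨hx, hqx⟩; exact ⟨hqx, (PySem.Set.mem_ofList _ _).1 hx⟩
  have hsorted : PySem.List.sorted (killers.map fL) (fun i => i) false
      = (canonIdx q 0 cs).map (·.1) := by
    have hperm : ((canonIdx q 0 cs).map (·.1)).Perm (killers.map fL) := by
      rw [e1]; exact e2.map fL
    exact PySem.List.sorted_eq_of_perm_of_pairwise_lt _ _ _ hperm
      (List.pairwise_map.2 canonIdx_fst_pairwise)
  rw [hsorted, PySem.List.foldl_append_singleton_eq_map, List.nil_append]
  have e3 : ((canonIdx q 0 cs).map (·.1)).map (fun i => PySem.List.pyGetD cs i ' ')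
      = (canonIdx q 0 cs).map (·.2) := by
    rw [List.map_map]
    exact List.map_eq_map_iff.mpr (fun p hp => (hpair p hp).2)
  rw [e3]

theorem seek_string_remains_spec : Claim_equal_seek_string_remains := by
  intro string _
  unfold Spec_seek_string_remains seek_string_remains seek_string_remains_alt
  by_cases hle : PySem.Str.len string ≤ 1
  · rw [if_pos hle, if_pos hle]
  · rw [if_neg hle, if_neg hle]
    have hne : string.toList ≠ [] := by
      intro h0
      apply hle
      rw [PySem.Str.len_eq, h0]
      simp
    have h := main_eq string.toList hne
    simpa only [AFoldA, cFold] using h
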